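-- pv_equiv track=rewrite | github.com/eugenexu0/Leetcode | 3974-xor-after-range-multiplication-queries-i/xor-after-range-multiplication-queries-i.py | xorAfterQueries
-- ===== SOURCE A (Python) =====
-- from typing import List
--
-- def xorAfterQueries(nums: List[int], queries: List[List[int]]) -> int:
--     for q in queries:
--         idx, r = q[0], q[1]
--         while idx <= r:
--             nums[idx] = (nums[idx] * q[3]) % (10**9 + 7)
--             idx += q[2]
--
--     res = nums[0]
--     for n in range(1, len(nums)):
--         res = res ^ nums[n]
--     return res
-- ===== SOURCE B (Python) =====
-- from typing import List
--
-- def xorAfterQueries(nums: List[int], queries: List[List[int]]) -> int: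
--     # Index-major, pure: for each position, multiply in every query whose
--     # arithmetic progression covers it, XOR-ing the results as we go.
--     MOD = 10**9 + 7
--     res = 0
--     for i, x in enumerate(nums):
--         v = x
--         for q in queries:
--             if q[0] <= i <= q[1] and (i - q[0]) % q[2] == 0:
--                 v = (v * q[3]) % MOD
--         res ^= v
--     return res
-- ===== Notes on version B (the rewrite author's own statement) =====
-- stated objective: alternative
-- what changed: B is pure and index-major: instead of mutating nums by stepping each query's arithmetic progression and then XOR-ing in a second pass, it makes one pass over indices, folding every query into the value at that index via a divisibility test, XOR-ing on the fly.
-- outside the precondition, e.g. on xorAfterQueries([2, 3], [[-1, -1, 1, 5]]): A returns 13, B returns 1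
import Mathlib
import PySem

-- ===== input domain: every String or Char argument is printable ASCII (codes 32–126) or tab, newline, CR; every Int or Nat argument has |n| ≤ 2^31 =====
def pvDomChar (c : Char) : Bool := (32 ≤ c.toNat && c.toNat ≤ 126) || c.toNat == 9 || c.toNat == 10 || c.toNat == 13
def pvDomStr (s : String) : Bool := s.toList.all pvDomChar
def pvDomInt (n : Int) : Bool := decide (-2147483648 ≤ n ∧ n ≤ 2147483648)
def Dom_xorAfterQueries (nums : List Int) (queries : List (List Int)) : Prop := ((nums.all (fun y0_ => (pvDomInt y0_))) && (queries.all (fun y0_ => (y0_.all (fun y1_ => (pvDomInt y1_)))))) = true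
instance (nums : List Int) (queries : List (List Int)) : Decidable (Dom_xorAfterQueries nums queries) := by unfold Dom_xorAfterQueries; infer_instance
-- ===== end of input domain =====

-- B is a pure index-major re-implementation (per-index fold over the queries instead of
-- per-query in-place stepping); A mutates its nums argument in place, B does not:
-- the equivalence proved here is about the return value only.

-- ===== PORT A =====
def pvMOD : Int := 1000000007

-- A's inner while loop: 'while idx <= r: nums[idx] = (nums[idx] * q[3]) % MOD; idx += q[2]'.
-- The '1 ≤ s' branch is a totality guard only: when the loop runs with step s ≤ 0 the Python
-- diverges or raises, and such inputs are outside Pre_.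
def pvAQ (r s v : Int) (idx : Int) (ns : List Int) : List Int :=
  if idx ≤ r then
    if 1 ≤ s then
      pvAQ r s v (idx + s) (PySem.List.pySetD ns idx (PySem.Int.mod (PySem.List.pyGetD ns idx 0 * v) pvMOD))
    else ns
  else ns
termination_by (r + 1 - idx).toNat
decreasing_by omega

def xorAfterQueries (nums : List Int) (queries : List (List Int)) : Int :=
  let ns := queries.foldl (fun ns q =>
    pvAQ (PySem.List.pyGetD q 1 0) (PySem.List.pyGetD q 2 0) (PySem.List.pyGetD q 3 0)
      (PySem.List.pyGetD q 0 0) ns) nums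
  (PySem.List.pyRange 1 (ns.length : Int) 1).foldl
    (fun res n => PySem.Int.bxor res (PySem.List.pyGetD ns n 0)) (PySem.List.pyGetD ns 0 0)

-- ===== PORT B =====
-- B's inner step: 'if q[0] <= i <= q[1] and (i - q[0]) % q[2] == 0: v = (v * q[3]) % MOD'
def pvFactorStep (i : Int) (val : Int) (q : List Int) : Int :=
  if PySem.List.pyGetD q 0 0 ≤ i ∧ i ≤ PySem.List.pyGetD q 1 0 then
    if PySem.Int.mod (i - PySem.List.pyGetD q 0 0) (PySem.List.pyGetD q 2 0) = 0 then
      PySem.Int.mod (val * PySem.List.pyGetD q 3 0) pvMOD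
    else val
  else val

def xorAfterQueries_alt (nums : List Int) (queries : List (List Int)) : Int :=
  (PySem.List.enumerate nums 0).foldl
    (fun res p => PySem.Int.bxor res (queries.foldl (pvFactorStep p.1) p.2)) 0

-- ===== PRECONDITION & SPEC =====
-- Pre_ is the problem's natural domain: nums nonempty, and each query either never enters the
-- loop (q[0] > q[1], needing only q[0], q[1] to exist) or has 4 entries, a nonnegative start,
-- a positive step, and its last touched index q[0] + q[2]*((q[1]-q[0])//q[2]) inside nums.
-- It excludes exactly the inputs where A raises IndexError (short queries, a touched index
-- past the end), diverges (step ≤ 0 with the loop running), or returns a value only via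
-- Python's negative-index wraparound (a quirk of A that B does not reproduce).
def pvQOK (n : Int) (q : List Int) : Prop :=
  2 ≤ q.length ∧
  (PySem.List.pyGetD q 0 0 ≤ PySem.List.pyGetD q 1 0 →
    4 ≤ q.length ∧ 0 ≤ PySem.List.pyGetD q 0 0 ∧ 1 ≤ PySem.List.pyGetD q 2 0 ∧
    PySem.List.pyGetD q 0 0 + PySem.List.pyGetD q 2 0 *
      PySem.Int.floordiv (PySem.List.pyGetD q 1 0 - PySem.List.pyGetD q 0 0) (PySem.List.pyGetD q 2 0) < n)

def Pre_xorAfterQueries (nums : List Int) (queries : List (List Int)) : Prop :=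
  nums ≠ [] ∧ ∀ q ∈ queries, pvQOK (nums.length : Int) q

instance (nums : List Int) (queries : List (List Int)) : Decidable (Pre_xorAfterQueries nums queries) := by
  unfold Pre_xorAfterQueries pvQOK; infer_instance

def pvWitness_xorAfterQueries : List Int × List (List Int) := ([1, 2, 3], [[0, 2, 2, 5]])

def Spec_xorAfterQueries (nums : List Int) (queries : List (List Int)) (out : Int) : Prop := out = xorAfterQueries_alt nums queries
instance (nums : List Int) (queries : List (List Int)) (out : Int) : Decidable (Spec_xorAfterQueries nums queries out) := by unfold Spec_xorAfterQueries; infer_instance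

-- ===== CLAIM (what is proved, stated in full; the proofs are below) =====
def Claim_equal_xorAfterQueries : Prop := ∀ (nums : List Int) (queries : List (List Int)), Dom_xorAfterQueries nums queries → Pre_xorAfterQueries nums queries → Spec_xorAfterQueries nums queries (xorAfterQueries nums queries)

-- ===== LEMMAS AND PROOFS =====

lemma pvAQ_length (r s v idx : Int) (ns : List Int) : (pvAQ r s v idx ns).length = ns.length := by
  induction idx, ns using pvAQ.induct r s v with
  | _ =>
    rw [pvAQ]
    split_ifs <;> simp_all [PySem.List.length_pySetD]

lemma set_getD (xs : List Int) (k : Nat) (a : Int) (j : Nat) :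
    (xs.set k a).getD j 0 = if j = k ∧ k < xs.length then a else xs.getD j 0 := by
  by_cases hjk : j = k
  · subst hjk
    by_cases hk : j < xs.length
    · simp [List.getD_eq_getElem?_getD, hk]
    · simp [List.getD_eq_getElem?_getD, hk]
  · simp [List.getD_eq_getElem?_getD, hjk, Ne.symm hjk]

-- After A's inner loop, the entry at j is multiplied (once, mod pvMOD) exactly when j lies on
-- the query's arithmetic progression.
lemma pvAQ_getD (r s v : Int) (hs : 1 ≤ s) :
    ∀ (idx : Int) (ns : List Int), 0 ≤ idx →
    (∀ i : Int, idx ≤ i → i ≤ r → (i - idx) % s = 0 → i < (ns.length : Int)) →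
    ∀ (j : Nat), j < ns.length →
    (pvAQ r s v idx ns).getD j 0 =
      if idx ≤ (j : Int) ∧ (j : Int) ≤ r ∧ ((j : Int) - idx) % s = 0
      then PySem.Int.mod (ns.getD j 0 * v) pvMOD else ns.getD j 0 := by
  intro idx ns
  induction idx, ns using pvAQ.induct r s v with
  | case1 idx ns hle hs' ih =>
    intro h0 hbound j hj
    have hidx : idx < (ns.length : Int) := hbound idx le_rfl hle (by simp)
    have hidxN : idx.toNat < ns.length := by omega
    rw [pvAQ, if_pos hle, if_pos hs']
    have hset : PySem.List.pySetD ns idx (PySem.Int.mod (PySem.List.pyGetD ns idx 0 * v) pvMOD)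
        = ns.set idx.toNat (PySem.Int.mod (PySem.List.pyGetD ns idx 0 * v) pvMOD) :=
      PySem.List.pySetD_of_nonneg ns _ h0
    set w := PySem.Int.mod (PySem.List.pyGetD ns idx 0 * v) pvMOD with hw
    rw [ih (by omega) ?bnd j (by rw [PySem.List.length_pySetD]; omega)]
    case bnd =>
      intro i h1 h2 h3
      rw [PySem.List.length_pySetD]
      apply hbound i (by omega) h2
      have e : (i - idx) % s = (i - (idx + s)) % s := by
        have e2 : i - idx = (i - (idx + s)) + s * 1 := by ring
        rw [e2, Int.add_mul_emod_self_left]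
      rw [e]; exact h3
    rw [hset, set_getD]
    by_cases hne : j = idx.toNat
    case pos =>
      have hji : (j : Int) = idx := by omega
      have hC' : ¬ (idx + s ≤ (j : Int) ∧ (j : Int) ≤ r ∧ ((j : Int) - (idx + s)) % s = 0) := by
        rintro ⟨h1, -, -⟩; omega
      have hC : idx ≤ (j : Int) ∧ (j : Int) ≤ r ∧ ((j : Int) - idx) % s = 0 := by
        refine ⟨by omega, by omega, by simp [hji]⟩
      rw [if_neg hC', if_pos hC, if_pos ⟨hne, hidxN⟩, hw]
      have : PySem.List.pyGetD ns idx 0 = ns.getD j 0 := by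
        rw [PySem.List.pyGetD_eq_getElem ns 0 h0 (by exact_mod_cast hidx)]
        rw [List.getD_eq_getElem?_getD, List.getElem?_eq_getElem hj]
        simp [hne]
      rw [this]
    case neg =>
      rw [if_neg (show ¬(j = idx.toNat ∧ idx.toNat < ns.length) from fun h => hne h.1)]
      have hcond : (idx + s ≤ (j : Int) ∧ (j : Int) ≤ r ∧ ((j : Int) - (idx + s)) % s = 0)
          ↔ (idx ≤ (j : Int) ∧ (j : Int) ≤ r ∧ ((j : Int) - idx) % s = 0) := by
        have hmod : ((j : Int) - (idx + s)) % s = ((j : Int) - idx) % s := by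
          have e2 : (j : Int) - idx = ((j : Int) - (idx + s)) + s * 1 := by ring
          rw [e2, Int.add_mul_emod_self_left]
        constructor
        · rintro ⟨h1, h2, h3⟩; exact ⟨by omega, h2, by rw [← hmod]; exact h3⟩
        · rintro ⟨h1, h2, h3⟩
          have hdvd : s ∣ ((j : Int) - idx) := Int.dvd_of_emod_eq_zero h3
          have : s ≤ (j : Int) - idx :=
            Int.le_of_dvd (by omega) hdvd
          exact ⟨by omega, h2, by rw [hmod]; exact h3⟩
      by_cases hC : idx ≤ (j : Int) ∧ (j : Int) ≤ r ∧ ((j : Int) - idx) % s = 0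
      · rw [if_pos (hcond.mpr hC), if_pos hC]
      · rw [if_neg (fun h => hC (hcond.mp h)), if_neg hC]
  | case2 idx ns hle hs' =>
    intro _ _ _ _
    exact absurd hs (by omega)
  | case3 idx ns hgt =>
    intro h0 hbound j hj
    rw [pvAQ, if_neg (by omega)]
    rw [if_neg]
    rintro ⟨h1, h2, -⟩; omega

-- A's whole pass over the queries, seen per index, is exactly B's per-index fold.
lemma pvFold_getD (nums : List Int) :
    ∀ (qs : List (List Int)) (ns : List Int), ns.length = nums.length →
    (∀ q ∈ qs, pvQOK (nums.length : Int) q) →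
    (qs.foldl (fun ns q =>
      pvAQ (PySem.List.pyGetD q 1 0) (PySem.List.pyGetD q 2 0) (PySem.List.pyGetD q 3 0)
        (PySem.List.pyGetD q 0 0) ns) ns).length = ns.length ∧
    ∀ j : Nat, j < ns.length →
    (qs.foldl (fun ns q =>
      pvAQ (PySem.List.pyGetD q 1 0) (PySem.List.pyGetD q 2 0) (PySem.List.pyGetD q 3 0)
        (PySem.List.pyGetD q 0 0) ns) ns).getD j 0 =
      qs.foldl (fun val q => pvFactorStep (j : Int) val q) (ns.getD j 0) := by
  intro qs
  induction qs with
  | nil => intro ns _ _; exact ⟨rfl, fun j _ => rfl⟩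
  | cons q qs ih =>
    intro ns hlen hq
    have hqok := hq q List.mem_cons_self
    unfold pvQOK at hqok
    set l := PySem.List.pyGetD q 0 0 with hl
    set r := PySem.List.pyGetD q 1 0 with hr
    set s := PySem.List.pyGetD q 2 0 with hs
    set v := PySem.List.pyGetD q 3 0 with hv
    set ns1 := pvAQ r s v l ns with hns1
    have hlen1 : ns1.length = ns.length := pvAQ_length r s v l ns
    have hstep : ∀ j : Nat, j < ns.length → ns1.getD j 0 = pvFactorStep (j : Int) (ns.getD j 0) q := by
      intro j hj
      by_cases hlr : l ≤ r
      · obtain ⟨-, hl0, hs1, hbd⟩ := hqok.2 hlr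
        rw [PySem.Int.floordiv_eq_ediv_of_pos (by omega)] at hbd
        rw [← hlen, mul_comm s ((r - l) / s)] at hbd
        have hbound : ∀ i : Int, l ≤ i → i ≤ r → (i - l) % s = 0 → i < (ns.length : Int) := by
          intro i h1 h2 h3
          have hdvd : s ∣ (i - l) := Int.dvd_of_emod_eq_zero h3
          have hk : (i - l) / s * s = i - l := Int.ediv_mul_cancel hdvd
          have hkle : (i - l) / s ≤ (r - l) / s := Int.ediv_le_ediv (by omega) (by omega)
          have : (i - l) / s * s ≤ (r - l) / s * s :=
            mul_le_mul_of_nonneg_right hkle (by omega)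
          omega
        rw [pvAQ_getD r s v hs1 l ns hl0 hbound j hj]
        rw [pvFactorStep, ← hl, ← hr, ← hs, ← hv]
        rw [PySem.Int.mod_eq_emod_of_pos (by omega : (0:Int) < s)]
        by_cases hc1 : l ≤ (j : Int) ∧ (j : Int) ≤ r
        · rw [if_pos hc1]
          by_cases hc2 : ((j : Int) - l) % s = 0
          · rw [if_pos ⟨hc1.1, hc1.2, hc2⟩, if_pos hc2]
          · rw [if_neg (fun h => hc2 h.2.2), if_neg hc2]
        · rw [if_neg (fun h => hc1 ⟨h.1, h.2.1⟩), if_neg hc1]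
      · have : ns1 = ns := by rw [hns1, pvAQ, if_neg (by omega)]
        rw [this, pvFactorStep, ← hl, ← hr, if_neg (by rintro ⟨h1, h2⟩; omega)]
    have htail := ih ns1 (hlen1.trans hlen) (fun p hp => hq p (List.mem_cons_of_mem q hp))
    constructor
    · rw [List.foldl_cons, ← hl, ← hr, ← hs, ← hv, ← hns1, htail.1, hlen1]
    · intro j hj
      rw [List.foldl_cons, List.foldl_cons, ← hl, ← hr, ← hs, ← hv, ← hns1,
        htail.2 j (by omega), hstep j hj]

lemma pv_final (nums : List Int) (queries : List (List Int))
    (hne0 : nums ≠ []) (hq : ∀ q ∈ queries, pvQOK (nums.length : Int) q) :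
    xorAfterQueries nums queries = xorAfterQueries_alt nums queries := by
  unfold xorAfterQueries xorAfterQueries_alt
  obtain ⟨hlenF, hgetF⟩ := pvFold_getD nums queries nums rfl hq
  set ws := queries.foldl (fun ns q =>
    pvAQ (PySem.List.pyGetD q 1 0) (PySem.List.pyGetD q 2 0) (PySem.List.pyGetD q 3 0)
      (PySem.List.pyGetD q 0 0) ns) nums with hws
  have hlenpos : 0 < ws.length := by
    rw [hlenF]
    exact List.length_pos_of_ne_nil hne0
  -- LHS: the XOR fold over indices 1.. is a fold over the tail of the final array
  rw [PySem.List.foldl_pyRange_pyGetD' ws 0 PySem.Int.bxor _ (by norm_num : (0:Int) ≤ 1)]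
  -- the final array is B's per-index value, mapped over the enumeration
  have hmap : ws = (PySem.List.enumerate nums 0).map
      (fun p => queries.foldl (pvFactorStep p.1) p.2) := by
    apply List.ext_getElem
    · rw [hlenF, List.length_map, PySem.List.length_enumerate]
    · intro j hj1 hj2
      have hjn : j < nums.length := by omega
      have hl := hgetF j hjn
      rw [List.getD_eq_getElem?_getD, List.getElem?_eq_getElem hj1] at hl
      simp only [Option.getD_some] at hl
      rw [hl, List.getElem_map, PySem.List.getElem_enumerate nums 0 j
        (by rw [PySem.List.length_enumerate]; omega)]
      simp [List.getD_eq_getElem?_getD, List.getElem?_eq_getElem hjn]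
  obtain ⟨w0, wt, hcons⟩ := List.exists_cons_of_ne_nil (List.ne_nil_of_length_pos hlenpos)
  have hfm : (PySem.List.enumerate nums 0).foldl
      (fun res p => PySem.Int.bxor res (queries.foldl (pvFactorStep p.1) p.2)) 0
      = ((PySem.List.enumerate nums 0).map
          (fun p => queries.foldl (pvFactorStep p.1) p.2)).foldl PySem.Int.bxor 0 :=
    List.foldl_map.symm
  rw [hfm, ← hmap, hcons]
  simp only [show Int.toNat 1 = 1 from rfl, List.drop_succ_cons, List.drop_zero,
    PySem.List.pyGetD_zero_cons, List.foldl_cons]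
  have h0x : PySem.Int.bxor 0 w0 = w0 := by
    rw [PySem.Int.bxor_comm]
    simp
  rw [h0x]

-- ===== VERDICT (by name: the statement is the Claim_ definition above) =====
theorem xorAfterQueries_spec : Claim_equal_xorAfterQueries := by
  intro nums queries _ hPre
  unfold Pre_xorAfterQueries at hPre
  unfold Spec_xorAfterQueries
  exact pv_final nums queries hPre.1 hPre.2
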